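-- pv_equiv track=rewrite | github.com/idbakk/ingest | lambdas/ingest-write-ai-report/_ingest-write-ai-report.py | choose_recommended_action
-- ===== SOURCE A (Python) =====
-- from typing import Any, Dict, List, Optional, Tuple
--
-- def choose_recommended_action(final_state: Optional[str], quality_outcome: Optional[str], attention_points: List[Dict[str, Any]]) -> str:
--     families = {item.get("family") for item in attention_points if isinstance(item, dict)}
--
--     if final_state == "REJECTED_POLICY" or quality_outcome == "FAIL":
--         if "media" in families or "media_policy" in families:
--             return "Investigate unreadable media and request corrected delivery"
--         if "checksum" in families:
--             return "Review findings and request redelivery or remediation"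
--         return "Review findings and request redelivery or remediation"
--
--     if attention_points:
--         if "checksum" in families:
--             return "Investigate checksum findings"
--         if "media" in families:
--             return "Investigate media probe failure"
--         if "media_policy" in families:
--             return "Review policy findings"
--         return "Manual QC Required"
--
--     return "Proceed with human review"
-- ===== SOURCE B (Python) =====
-- def choose_recommended_action(final_state, quality_outcome, attention_points):
--     # Priority-scoring: pick the rank table and message list for the active mode,
--     # reduce attention_points to the maximal rank, then index the message list.
--     if final_state == "REJECTED_POLICY" or quality_outcome == "FAIL":
--         rank = {"media": 1, "media_policy": 1}
--         messages = ["Review findings and request redelivery or remediation",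
--                     "Investigate unreadable media and request corrected delivery"]
--     elif attention_points:
--         rank = {"checksum": 3, "media": 2, "media_policy": 1}
--         messages = ["Manual QC Required",
--                     "Review policy findings",
--                     "Investigate media probe failure",
--                     "Investigate checksum findings"]
--     else:
--         return "Proceed with human review"
--     best = 0
--     for item in attention_points:
--         if isinstance(item, dict):
--             best = max(best, rank.get(item.get("family"), 0))
--     return messages[best]
-- ===== Notes on version B (the rewrite author's own statement) =====
-- stated objective: alternative
-- what changed: B replaces A's set construction plus per-family membership cascades by priority scoring: each branch selects a rank table and message list, a single max-fold reduces attention_points to the highest rank present, and that rank indexes the message list.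
import Mathlib
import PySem

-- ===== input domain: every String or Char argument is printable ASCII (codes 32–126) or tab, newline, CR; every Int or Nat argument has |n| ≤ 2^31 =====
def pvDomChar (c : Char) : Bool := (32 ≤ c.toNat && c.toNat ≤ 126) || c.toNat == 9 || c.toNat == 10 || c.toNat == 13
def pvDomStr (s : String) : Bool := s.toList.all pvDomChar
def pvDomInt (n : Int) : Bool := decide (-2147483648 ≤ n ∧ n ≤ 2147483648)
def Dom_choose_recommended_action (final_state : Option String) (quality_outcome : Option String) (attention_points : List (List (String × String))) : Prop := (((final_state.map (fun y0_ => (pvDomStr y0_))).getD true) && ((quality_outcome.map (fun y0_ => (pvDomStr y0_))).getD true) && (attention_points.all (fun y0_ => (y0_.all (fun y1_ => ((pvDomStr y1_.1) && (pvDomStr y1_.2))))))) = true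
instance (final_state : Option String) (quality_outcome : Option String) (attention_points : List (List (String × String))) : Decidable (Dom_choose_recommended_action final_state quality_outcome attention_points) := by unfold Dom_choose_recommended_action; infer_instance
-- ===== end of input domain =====

-- B replaces A's set + membership cascades by priority scoring: a per-branch rank table,
-- one max-fold to the highest rank present, and that rank indexing a message list (objective: alternative).

-- ===== PORT A =====
def choose_recommended_action (final_state : Option String) (quality_outcome : Option String) (attention_points : List (List (String × String))) : String :=
  -- families = {item.get("family") for item in attention_points if isinstance(item, dict)}
  -- (isinstance(item, dict) is always true under the type convention)
  let families : PySem.Set (Option String) :=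
    PySem.Set.ofList (attention_points.map (fun item => item.lookup "family"))
  if final_state == some "REJECTED_POLICY" || quality_outcome == some "FAIL" then
    if families.contains (some "media") || families.contains (some "media_policy") then
      "Investigate unreadable media and request corrected delivery"
    else if families.contains (some "checksum") then
      "Review findings and request redelivery or remediation"
    else
      "Review findings and request redelivery or remediation"
  else if !attention_points.isEmpty then
    if families.contains (some "checksum") then "Investigate checksum findings"
    else if families.contains (some "media") then "Investigate media probe failure"
    else if families.contains (some "media_policy") then "Review policy findings"
    else "Manual QC Required"
  else
    "Proceed with human review"

-- ===== PORT B =====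
-- rank.get(item.get("family"), 0): item.get may yield None, which never equals a string key, hence 0
def pvRankOf (rank : PySem.Dict String Nat) (item : List (String × String)) : Nat :=
  match item.lookup "family" with
  | some f => PySem.Dict.getD rank f 0
  | none => 0

-- best = max-fold of ranks; messages[best]: best never exceeds the largest rank, so the
-- index is always in range and List.getD with a dummy default is exact for Python's messages[best]
def choose_recommended_action_alt (final_state : Option String) (quality_outcome : Option String) (attention_points : List (List (String × String))) : String :=
  if final_state == some "REJECTED_POLICY" || quality_outcome == some "FAIL" then
    let rank : PySem.Dict String Nat := PySem.Dict.ofList [("media", 1), ("media_policy", 1)]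
    let messages := ["Review findings and request redelivery or remediation",
                     "Investigate unreadable media and request corrected delivery"]
    messages.getD (attention_points.foldl (fun b item => max b (pvRankOf rank item)) 0) ""
  else if !attention_points.isEmpty then
    let rank : PySem.Dict String Nat := PySem.Dict.ofList [("checksum", 3), ("media", 2), ("media_policy", 1)]
    let messages := ["Manual QC Required",
                     "Review policy findings",
                     "Investigate media probe failure",
                     "Investigate checksum findings"]
    messages.getD (attention_points.foldl (fun b item => max b (pvRankOf rank item)) 0) ""
  else
    "Proceed with human review"

-- ===== PRECONDITION & SPEC =====
def Spec_choose_recommended_action (final_state : Option String) (quality_outcome : Option String) (attention_points : List (List (String × String))) (out : String) : Prop := out = choose_recommended_action_alt final_state quality_outcome attention_points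
instance (final_state : Option String) (quality_outcome : Option String) (attention_points : List (List (String × String))) (out : String) : Decidable (Spec_choose_recommended_action final_state quality_outcome attention_points out) := by unfold Spec_choose_recommended_action; infer_instance

-- ===== CLAIM =====
def Claim_equal_choose_recommended_action : Prop := ∀ (final_state : Option String) (quality_outcome : Option String) (attention_points : List (List (String × String))), Dom_choose_recommended_action final_state quality_outcome attention_points → Spec_choose_recommended_action final_state quality_outcome attention_points (choose_recommended_action final_state quality_outcome attention_points)

-- ===== LEMMAS AND PROOFS =====

-- A's set membership coincides with an any-scan over the family lookups
theorem contains_families_eq_any (ap : List (List (String × String))) (fam : String) :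
    (PySem.Set.ofList (ap.map (fun item => item.lookup "family"))).contains (some fam)
      = ap.any (fun item => item.lookup "family" == some fam) := by
  rw [Bool.eq_iff_iff]
  simp [PySem.Set.mem_ofList, List.any_eq_true]

-- hoist the accumulator out of the max-fold
theorem foldl_max_hoist (r : List (String × String) → Nat) (ap : List (List (String × String))) :
    ∀ b, ap.foldl (fun a it => max a (r it)) b = max b (ap.foldl (fun a it => max a (r it)) 0) := by
  induction ap with
  | nil => simp
  | cons h t ih =>
      intro b
      simp only [List.foldl_cons]
      rw [ih (max b (r h)), ih (max 0 (r h))]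
      simp [Nat.max_assoc]

-- reject/fail branch: the fold is 1 iff a media or media_policy family occurs
theorem best_reject (ap : List (List (String × String))) :
    ap.foldl (fun b item => max b (pvRankOf (PySem.Dict.ofList [("media", 1), ("media_policy", 1)]) item)) 0
      = if ap.any (fun it => it.lookup "family" == some "media")
            || ap.any (fun it => it.lookup "family" == some "media_policy") then 1 else 0 := by
  induction ap with
  | nil => simp
  | cons h t ih =>
      simp only [List.foldl_cons, List.any_cons]
      rw [foldl_max_hoist, ih]
      have hr : pvRankOf (PySem.Dict.ofList [("media", 1), ("media_policy", 1)]) h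
          = if (h.lookup "family" == some "media") || (h.lookup "family" == some "media_policy")
            then 1 else 0 := by
        unfold pvRankOf
        cases hl : h.lookup "family" with
        | none => simp
        | some f =>
            by_cases h1 : f = "media"
            · subst h1; decide
            · by_cases h2 : f = "media_policy"
              · subst h2; decide
              · have e1 : ("media" == f) = false := by simp [Ne.symm h1]
                have e2 : ("media_policy" == f) = false := by simp [Ne.symm h2]
                simp [PySem.Dict.ofList, PySem.Dict.update, PySem.Dict.getD,
                      PySem.Dict.get?, PySem.Dict.insert, PySem.Dict.contains,
                      PySem.Dict.empty, List.find?, e1, e2, h1, h2]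
      rw [hr]
      split_ifs <;> simp_all <;> tauto

-- attention branch: the fold is the highest priority family present
theorem best_attn (ap : List (List (String × String))) :
    ap.foldl (fun b item => max b (pvRankOf (PySem.Dict.ofList [("checksum", 3), ("media", 2), ("media_policy", 1)]) item)) 0
      = if ap.any (fun it => it.lookup "family" == some "checksum") then 3
        else if ap.any (fun it => it.lookup "family" == some "media") then 2
        else if ap.any (fun it => it.lookup "family" == some "media_policy") then 1
        else 0 := by
  induction ap with
  | nil => simp
  | cons h t ih =>
      simp only [List.foldl_cons, List.any_cons]
      rw [foldl_max_hoist, ih]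
      have hr : pvRankOf (PySem.Dict.ofList [("checksum", 3), ("media", 2), ("media_policy", 1)]) h
          = if h.lookup "family" == some "checksum" then 3
            else if h.lookup "family" == some "media" then 2
            else if h.lookup "family" == some "media_policy" then 1
            else 0 := by
        unfold pvRankOf
        cases hl : h.lookup "family" with
        | none => simp
        | some f =>
            by_cases h1 : f = "checksum"
            · subst h1; decide
            · by_cases h2 : f = "media"
              · subst h2; decide
              · by_cases h3 : f = "media_policy"
                · subst h3; decide
                · have e1 : ("checksum" == f) = false := by simp [Ne.symm h1]
                  have e2 : ("media" == f) = false := by simp [Ne.symm h2]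
                  have e3 : ("media_policy" == f) = false := by simp [Ne.symm h3]
                  simp [PySem.Dict.ofList, PySem.Dict.update, PySem.Dict.getD,
                        PySem.Dict.get?, PySem.Dict.insert, PySem.Dict.contains,
                        PySem.Dict.empty, List.find?, e1, e2, e3, h1, h2, h3]
      rw [hr]
      split_ifs <;> simp_all <;> tauto

-- ===== VERDICT =====
theorem choose_recommended_action_spec : Claim_equal_choose_recommended_action := by
  intro fs qo ap _
  unfold Spec_choose_recommended_action choose_recommended_action choose_recommended_action_alt
  simp only [contains_families_eq_any, best_reject, best_attn]
  by_cases hg : (fs == some "REJECTED_POLICY" || qo == some "FAIL") = true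
  · simp only [hg, if_true]
    by_cases h1 : (ap.any (fun it => it.lookup "family" == some "media")
        || ap.any (fun it => it.lookup "family" == some "media_policy")) = true <;>
      simp [h1]
  · simp only [Bool.not_eq_true] at hg
    simp only [hg, Bool.false_eq_true, if_false]
    by_cases he : ap.isEmpty
    · simp [he]
    · simp only [he, Bool.not_false, if_true]
      by_cases hc : ap.any (fun it => it.lookup "family" == some "checksum") <;>
      by_cases hm : ap.any (fun it => it.lookup "family" == some "media") <;>
      by_cases hp : ap.any (fun it => it.lookup "family" == some "media_policy") <;>
        simp [hc, hm, hp]
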